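-- pv_equiv track=rewrite | github.com/Vee995/Cryptography-Project | Project_Main.py | nthLetters
-- ===== SOURCE A (Python) =====
-- def nthLetters(factor, substring):
--     result = []
--     sub = ""
--     for repeat in range (factor):
--         index = repeat
--
--         while index < len(substring):
--             sub += substring[index]
--             index += factor
--
--         result.append(sub)
--     return result
-- ===== SOURCE B (Python) =====
-- def nthLetters(factor, substring):
--     # phase 1: materialise the per-column slices
--     cols = [substring[r::factor] for r in range(factor)]
--     # phase 2: cumulative (prefix) pass over the columns
--     result = []
--     acc = ""
--     for col in cols:
--         acc += col
--         result.append(acc)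
--     return result
-- ===== Notes on version B (the rewrite author's own statement) =====
-- stated objective: simpler
-- what changed: Replaces A's single interleaved loop (a never-reset buffer fed by an inner character-by-character while) with two explicit phases: build the column strings with stride slices substring[r::factor], then one cumulative prefix pass over them.
import Mathlib
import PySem

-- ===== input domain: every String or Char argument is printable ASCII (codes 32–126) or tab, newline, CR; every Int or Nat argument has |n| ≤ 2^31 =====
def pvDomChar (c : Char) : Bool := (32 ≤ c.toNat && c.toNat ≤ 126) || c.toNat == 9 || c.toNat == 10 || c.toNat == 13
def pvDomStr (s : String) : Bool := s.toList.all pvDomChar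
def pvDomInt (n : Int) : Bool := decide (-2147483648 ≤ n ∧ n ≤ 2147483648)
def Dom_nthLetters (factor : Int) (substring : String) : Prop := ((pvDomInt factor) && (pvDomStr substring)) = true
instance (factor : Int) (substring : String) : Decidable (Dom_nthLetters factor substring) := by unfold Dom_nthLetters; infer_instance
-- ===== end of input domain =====

-- B replaces A's single interleaved loop with two explicit phases — stride slices
-- substring[r::factor], then one cumulative prefix pass — for a simpler decomposition.


-- ===== PORT A =====
-- A's inner `while index < len(substring)` loop; fuel-bounded (fuel = len(substring)
-- suffices: the loop is only entered with factor ≥ 1, so index grows by ≥ 1 per step).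
-- substring[index] is read with 0 ≤ index < len here, so pyGet? is always `some`
-- and the `.getD ' '` default is never used.
def nthLettersWhile (s : List Char) (factor : Int) : Nat → Int → List Char → List Char
  | 0, _, sub => sub
  | fuel+1, index, sub =>
    if index < (s.length : Int) then
      nthLettersWhile s factor fuel (index + factor)
        (sub ++ [(PySem.List.pyGet? s index).getD ' '])
    else sub

def nthLetters (factor : Int) (substring : String) : List String :=
  let s := substring.toList
  let st := (PySem.List.pyRange 0 factor 1).foldl
    (fun (st : List (List Char) × List Char) repeat_ =>
      let sub := nthLettersWhile s factor s.length repeat_ st.2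
      (st.1 ++ [sub], sub)) ([], [])
  st.1.map String.ofList

-- ===== PORT B =====
def nthLetters_alt (factor : Int) (substring : String) : List String :=
  let s := substring.toList
  -- phase 1: cols = [substring[r::factor] for r in range(factor)]
  -- (slice? is `none` only for step 0; here r ∈ range(factor) forces factor ≥ 1)
  let cols := (PySem.List.pyRange 0 factor 1).map
    (fun r => (PySem.List.slice? s (some r) none factor).getD [])
  -- phase 2: cumulative prefix pass
  let st := cols.foldl
    (fun (st : List (List Char) × List Char) col =>
      (st.1 ++ [st.2 ++ col], st.2 ++ col)) ([], [])
  st.1.map String.ofList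

-- ===== PRECONDITION & SPEC =====
def Spec_nthLetters (factor : Int) (substring : String) (out : List String) : Prop := out = nthLetters_alt factor substring
instance (factor : Int) (substring : String) (out : List String) : Decidable (Spec_nthLetters factor substring out) := by unfold Spec_nthLetters; infer_instance

-- ===== CLAIM (what is proved, stated in full; the proofs are below) =====
def Claim_equal_nthLetters : Prop := ∀ (factor : Int) (substring : String), Dom_nthLetters factor substring → Spec_nthLetters factor substring (nthLetters factor substring)

-- ===== LEMMAS AND PROOFS =====

-- xs[j::f] (f ≥ 1, 0 ≤ j < len) expressed as the filterMap the slice? definition produces.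
theorem slice_step_chars (s : List Char) (f j : Int) (hf : 1 ≤ f) (hj0 : 0 ≤ j)
    (hjl : j < (s.length : Int)) :
    PySem.List.slice? s (some j) none f =
      some (List.filterMap (fun k : Nat => s[(j + f * (k:Int)).toNat]?)
        (List.range ((((s.length:Int) - j + f - 1) / f).toNat))) := by
  unfold PySem.List.slice? PySem.List.sliceIndices
  rw [if_neg (by omega : ¬ f = 0)]
  simp only [if_neg (by omega : ¬ f < 0)]
  rw [if_neg (by omega : ¬ j < 0)]
  have h1 : min j (s.length:Int) = j := by omega
  rw [h1, if_pos (by omega : (0:Int) < f), if_pos hjl]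

-- xs[i::f] is empty once i has reached the end.
theorem slice_step_nil (s : List Char) (f i : Int) (hf : 1 ≤ f)
    (hi : (s.length : Int) ≤ i) :
    PySem.List.slice? s (some i) none f = some [] := by
  unfold PySem.List.slice? PySem.List.sliceIndices
  rw [if_neg (by omega : ¬ f = 0)]
  simp only [if_neg (by omega : ¬ f < 0)]
  rw [if_neg (by omega : ¬ i < 0)]
  have h1 : min i (s.length:Int) = (s.length:Int) := by omega
  rw [h1, if_pos (by omega : (0:Int) < f), if_neg (by omega : ¬ (s.length:Int) < (s.length:Int))]
  simp

-- xs[i::f] = xs[i] :: xs[i+f::f] for 0 ≤ i < len, f ≥ 1.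
theorem slice_step_cons (s : List Char) (f i : Int) (hf : 1 ≤ f) (h0 : 0 ≤ i)
    (hi : i < (s.length : Int)) :
    (PySem.List.slice? s (some i) none f).getD [] =
      (PySem.List.pyGet? s i).getD ' ' ::
        (PySem.List.slice? s (some (i + f)) none f).getD [] := by
  have hget : (PySem.List.pyGet? s i).getD ' ' = s[i.toNat]'(by omega) := by
    simp only [PySem.List.pyGet?, PySem.List.pyIdx?, if_pos h0, if_pos hi]
    rw [show (some i.toNat).bind (fun a => s[a]?) = s[i.toNat]? from rfl,
      List.getElem?_eq_getElem (show i.toNat < s.length by omega)]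
    rfl
  have hg0 : s[(i + f * ((0:Nat):Int)).toNat]? = some (s[i.toNat]'(by omega)) := by
    simp only [Nat.cast_zero, mul_zero, add_zero]
    exact List.getElem?_eq_getElem (by omega)
  by_cases h2 : i + f < (s.length:Int)
  · rw [slice_step_chars s f i hf h0 hi, slice_step_chars s f (i+f) hf (by omega) h2]
    have harith : (((s.length:Int) - i + f - 1) / f).toNat
        = (((s.length:Int) - (i+f) + f - 1) / f).toNat + 1 := by
      have e1 : (s.length:Int) - i + f - 1 = ((s.length:Int) - (i+f) + f - 1) + 1 * f := by ring
      have e2 := Int.add_mul_ediv_right ((s.length:Int) - (i+f) + f - 1) 1 (by omega : f ≠ 0)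
      rw [e1, e2]
      have hnn : 0 ≤ ((s.length:Int) - (i+f) + f - 1) / f :=
        Int.ediv_nonneg (by omega) (by omega)
      omega
    rw [harith, List.range_succ_eq_map]
    simp only [List.filterMap_cons, List.filterMap_map]
    rw [hg0]
    rw [show ((fun k : Nat => s[(i + f * (k:Int)).toNat]?) ∘ Nat.succ) =
        (fun k : Nat => s[((i+f) + f * (k:Int)).toNat]?) from by
      funext k; simp only [Function.comp_apply]; congr 2; push_cast; ring]
    simp [hget]
  · rw [slice_step_chars s f i hf h0 hi, slice_step_nil s f (i+f) hf (by omega)]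
    have hone : (((s.length:Int) - i + f - 1) / f).toNat = 1 := by
      have e1 : (s.length:Int) - i + f - 1 = ((s.length:Int) - i - 1) + 1 * f := by ring
      have e2 := Int.add_mul_ediv_right ((s.length:Int) - i - 1) 1 (by omega : f ≠ 0)
      have e3 : ((s.length:Int) - i - 1) / f = 0 :=
        Int.ediv_eq_zero_of_lt (by omega) (by omega)
      rw [e1, e2, e3]
      rfl
    rw [hone, hget, List.range_one, show List.filterMap (fun k : Nat => s[(i + f * (k:Int)).toNat]?) [0]
      = (s[(i + f * ((0:Nat):Int)).toNat]?).toList from by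
        simp [List.filterMap_cons]; rcases s[(i + f * ((0:Nat):Int)).toNat]? with _ | c <;> rfl, hg0]
    rfl

-- A's inner while loop, run with enough fuel, appends exactly the stride slice.
theorem while_eq_slice (s : List Char) (f : Int) (hf : 1 ≤ f) :
    ∀ (fuel : Nat) (i : Int) (sub : List Char), 0 ≤ i → s.length ≤ i.toNat + fuel →
      nthLettersWhile s f fuel i sub = sub ++ (PySem.List.slice? s (some i) none f).getD [] := by
  intro fuel
  induction fuel with
  | zero =>
    intro i sub h0 hlen
    rw [slice_step_nil s f i hf (by omega)]
    simp [nthLettersWhile]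
  | succ n ih =>
    intro i sub h0 hlen
    by_cases hi : i < (s.length : Int)
    · rw [show nthLettersWhile s f (n+1) i sub = nthLettersWhile s f n (i + f)
          (sub ++ [(PySem.List.pyGet? s i).getD ' ']) from by
        simp [nthLettersWhile, hi]]
      rw [ih (i + f) _ (by omega) (by omega), slice_step_cons s f i hf h0 hi]
      simp
    · rw [slice_step_nil s f i hf (by omega)]
      simp [nthLettersWhile, hi]

-- ===== VERDICT (by name: the statement is the Claim_ definition above) =====
theorem nthLetters_spec : Claim_equal_nthLetters := by
  intro factor substring _
  unfold Spec_nthLetters nthLetters nthLetters_alt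
  simp only [List.foldl_map]
  congr 1
  apply congrArg Prod.fst
  apply PySem.List.foldl_congr_mem
  intro st r hr
  have hmem := (PySem.List.mem_pyRange_one).mp hr
  have hf : 1 ≤ factor := by omega
  rw [while_eq_slice substring.toList factor hf substring.toList.length r st.2
    (by omega) (by omega)]
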